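-- pv_equiv track=rewrite | github.com/TheAlgorithms/Python | bit_manipulation/binary_parity_pattern.py | binary_parity_pattern
-- ===== SOURCE A (Python) =====
-- def binary_parity_pattern(number: int) -> str:
--     """
--     Return a binary parity pattern string for a given integer.
--
--     >>> binary_parity_pattern(13)
--     '0b1001'
--     >>> binary_parity_pattern(7)
--     '0b101'
--     >>> binary_parity_pattern(4)
--     '0b111'
--     >>> binary_parity_pattern(0)
--     '0b0'
--     """
--     if number < 0:
--         raise ValueError("Number must be non-negative")
--
--     if number == 0:
--         return "0b0"
--
--     binary_str = bin(number)[2:]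
--     cum_sum = 0
--     pattern = []
--
--     for bit in binary_str:
--         cum_sum += int(bit)
--         pattern.append(str(cum_sum % 2))
--
--     result = ''.join(pattern).lstrip('0')
--     return '0b' + (result if result else '0')
-- ===== SOURCE B (Python) =====
-- def binary_parity_pattern(number: int) -> str:
--     if number < 0:
--         raise ValueError("Number must be non-negative")
--     # prefix parity from the MSB is exactly the Gray-code -> binary decode
--     mask = number >> 1
--     while mask:
--         number ^= mask
--         mask >>= 1
--     return bin(number)
-- ===== Notes on version B (the rewrite author's own statement) =====
-- stated objective: alternative
-- what changed: Replaces the binary-string scan with cumulative-sum list, join and lstrip by the closed-form Gray-code-to-binary decode (repeated shifted XORs on the integer) followed by a single bin() call.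
import Mathlib
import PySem

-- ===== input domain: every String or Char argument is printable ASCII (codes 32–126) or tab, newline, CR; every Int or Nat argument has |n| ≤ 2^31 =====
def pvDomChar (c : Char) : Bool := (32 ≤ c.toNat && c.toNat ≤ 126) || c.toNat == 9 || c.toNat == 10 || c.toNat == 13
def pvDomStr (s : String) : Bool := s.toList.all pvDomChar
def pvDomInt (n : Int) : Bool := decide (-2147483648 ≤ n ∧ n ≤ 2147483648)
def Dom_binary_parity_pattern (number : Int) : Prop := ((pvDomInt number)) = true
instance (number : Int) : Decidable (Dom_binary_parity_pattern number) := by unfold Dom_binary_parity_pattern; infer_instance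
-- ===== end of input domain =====

-- B replaces A's binary-string scan (cumulative sums, list of chars, join, lstrip)
-- by the closed-form Gray-code-to-binary decode on the integer (repeated shifted XORs)
-- followed by a single bin() call: an alternative algorithm of the same cost.


-- ===== PORT A =====
-- Python's bin(n) for n ≥ 0 (exact there; negatives are excluded by Pre_): "0b" + binary digits, MSB first.
def binDigits (n : Nat) : List Char :=
  if h : n = 0 then [] else binDigits (n / 2) ++ [if n % 2 == 1 then '1' else '0']
decreasing_by exact Nat.div_lt_self (Nat.pos_of_ne_zero h) (by omega)

def pyBin (n : Int) : String :=
  String.ofList ('0' :: 'b' :: (if n = 0 then ['0'] else binDigits n.toNat))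

def binary_parity_pattern (number : Int) : String :=
  -- Python raises ValueError for number < 0: excluded by Pre_binary_parity_pattern.
  if number = 0 then "0b0"
  else
    let binary_str : List Char := (pyBin number).toList.drop 2   -- bin(number)[2:]
    let st := binary_str.foldl
      (fun (st : Int × List Char) (bit : Char) =>
        -- int(bit): binary_str only contains '0'/'1', so this is exact
        let cum_sum : Int := st.1 + (if bit == '1' then 1 else 0)
        -- str(cum_sum % 2): cum_sum % 2 ∈ {0,1} here, so this is exact
        (cum_sum, st.2 ++ [if cum_sum % 2 == 1 then '1' else '0']))
      ((0 : Int), ([] : List Char))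
    let result : List Char := st.2.dropWhile (fun c => c == '0')  -- ''.join(pattern).lstrip('0')
    String.ofList ('0' :: 'b' :: (if result.isEmpty then ['0'] else result))

-- ===== PORT B =====
-- while mask: number ^= mask; mask >>= 1   (mask ≤ 0 guard only for totality; Python raises before on negatives)
def grayLoop (n mask : Int) : Int :=
  if h : mask ≤ 0 then n else grayLoop (Int.xor n mask) (Int.shiftRight mask 1)
termination_by mask.toNat
decreasing_by
  have h1 : (0:Int) < mask := by omega
  have h2 : Int.shiftRight mask 1 = mask / 2 := by
    simpa using Int.shiftRight_eq_div_pow mask 1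
  rw [h2]; omega

def binary_parity_pattern_alt (number : Int) : String :=
  -- Python raises ValueError for number < 0: excluded by Pre_binary_parity_pattern.
  pyBin (grayLoop number (Int.shiftRight number 1))

-- ===== PRECONDITION & SPEC =====
-- Pre_ excludes exactly the negative inputs, on which Python A raises ValueError.
def Pre_binary_parity_pattern (number : Int) : Prop := 0 ≤ number
instance (number : Int) : Decidable (Pre_binary_parity_pattern number) := by
  unfold Pre_binary_parity_pattern; infer_instance
def pvWitness_binary_parity_pattern : Int := 13

def Spec_binary_parity_pattern (number : Int) (out : String) : Prop := out = binary_parity_pattern_alt number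
instance (number : Int) (out : String) : Decidable (Spec_binary_parity_pattern number out) := by unfold Spec_binary_parity_pattern; infer_instance

-- ===== CLAIM (what is proved, stated in full; the proofs are below) =====
def Claim_equal_binary_parity_pattern : Prop := ∀ (number : Int), Dom_binary_parity_pattern number → Pre_binary_parity_pattern number → Spec_binary_parity_pattern number (binary_parity_pattern number)

-- ===== LEMMAS AND PROOFS =====

-- gN n = n XOR (n>>1) XOR (n>>2) XOR ... : the Gray decode, as a recursion.
def gN (n : Nat) : Nat :=
  if h : n = 0 then 0 else n ^^^ gN (n / 2)
decreasing_by exact Nat.div_lt_self (Nat.pos_of_ne_zero h) (by omega)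

-- prefix-parity pattern of a char list, threading the running parity p
def pat (p : Bool) : List Char → List Char
  | [] => []
  | c :: t =>
    let p' := p ^^ (c == '1')
    (if p' then '1' else '0') :: pat p' t

def parAcc (p : Bool) (xs : List Char) : Bool := xs.foldl (fun p c => p ^^ (c == '1')) p

theorem gN_zero : gN 0 = 0 := by unfold gN; simp

theorem gN_of_ne (n : Nat) (h : n ≠ 0) : gN n = n ^^^ gN (n / 2) := by
  conv_lhs => rw [gN]
  simp [h]

theorem gN_div2 (n : Nat) : gN (n / 2) = gN n / 2 := by
  induction n using Nat.strong_induction_on with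
  | _ n ih =>
    by_cases h : n = 0
    · subst h; simp [gN_zero]
    · rw [gN_of_ne n h]
      have hx : (n ^^^ gN (n / 2)) / 2 = n / 2 ^^^ gN (n / 2) / 2 := by
        have := @Nat.shiftRight_xor_distrib 1 n (gN (n / 2))
        simpa [Nat.shiftRight_one] using this
      rw [hx]
      by_cases h2 : n / 2 = 0
      · simp [h2, gN_zero]
      · have : gN (n / 2) / 2 = gN (n / 2 / 2) := by
          have := ih (n / 2) (Nat.div_lt_self (Nat.pos_of_ne_zero h) (by omega))
          omega
        rw [this, ← gN_of_ne (n / 2) h2]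

theorem gN_pos (n : Nat) (h : 0 < n) : 0 < gN n := by
  rcases Nat.eq_zero_or_pos (gN n) with hz | hp
  · exfalso
    have h1 : gN n = n ^^^ gN (n / 2) := gN_of_ne n (by omega)
    have h2 : gN (n / 2) = gN n / 2 := gN_div2 n
    rw [hz] at h1 h2
    have : n = gN (n / 2) := by
      have := Nat.xor_eq_zero.mp h1.symm
      omega
    omega
  · exact hp

-- testBit of 2*x + c for c ≤ 1
theorem testBit_two_mul_add_zero (x c : Nat) (hc : c ≤ 1) :
    (2 * x + c).testBit 0 = decide (c = 1) := by
  rw [Nat.testBit_zero]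
  have : (2 * x + c) % 2 = c := by omega
  rw [this]

theorem testBit_two_mul_add_succ (x c : Nat) (hc : c ≤ 1) (i : Nat) :
    (2 * x + c).testBit (i + 1) = x.testBit i := by
  rw [Nat.testBit_succ]
  congr 1
  omega

-- key XOR identity: if m = q ^^^ q/2 then (2m+b) ^^^ q = 2q + (b xor q%2)
theorem key_xor (q b : Nat) (hb : b ≤ 1) :
    (2 * (q ^^^ q / 2) + b) ^^^ q = 2 * q + (b ^^^ q % 2) := by
  have he : b ^^^ q % 2 ≤ 1 := by
    have hq : q % 2 = 0 ∨ q % 2 = 1 := by omega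
    rcases hq with h | h <;> rcases Nat.le_one_iff_eq_zero_or_eq_one.mp hb with h' | h' <;>
      simp [h, h']
  apply Nat.eq_of_testBit_eq
  intro i
  cases i with
  | zero =>
    rw [Nat.testBit_xor, testBit_two_mul_add_zero _ _ hb, testBit_two_mul_add_zero _ _ he,
      Nat.testBit_zero]
    have hq : q % 2 = 0 ∨ q % 2 = 1 := by omega
    rcases hq with h | h <;> rcases Nat.le_one_iff_eq_zero_or_eq_one.mp hb with h' | h' <;>
      simp [h, h']
  | succ i =>
    rw [Nat.testBit_xor, testBit_two_mul_add_succ _ _ hb, testBit_two_mul_add_succ _ _ he,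
      Nat.testBit_xor]
    have hdiv : (q / 2).testBit i = q.testBit (i + 1) := (Nat.testBit_succ q i).symm
    rw [hdiv]
    cases hqi : q.testBit i <;> cases hqs : q.testBit (i + 1) <;> simp

theorem gN_two_mul_add (m b : Nat) (hb : b ≤ 1) (hpos : 0 < 2 * m + b) :
    gN (2 * m + b) = 2 * gN m + (b ^^^ gN m % 2) := by
  have h1 : gN (2 * m + b) = (2 * m + b) ^^^ gN ((2 * m + b) / 2) := gN_of_ne _ (by omega)
  have h2 : (2 * m + b) / 2 = m := by omega
  rw [h2] at h1
  have hm : m = gN m ^^^ gN m / 2 := by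
    by_cases h : m = 0
    · simp [h, gN_zero]
    · have := gN_of_ne m h
      rw [gN_div2 m] at this
      have h3 : gN m ^^^ gN m / 2 = (m ^^^ gN m / 2) ^^^ gN m / 2 := by rw [← this]
      rw [h3, Nat.xor_assoc, Nat.xor_self, Nat.xor_zero]
  rw [h1]
  set q := gN m with hq
  rw [hm]
  exact key_xor q b hb

theorem binDigits_zero : binDigits 0 = [] := by unfold binDigits; simp

theorem binDigits_of_ne (n : Nat) (h : n ≠ 0) :
    binDigits n = binDigits (n / 2) ++ [if n % 2 == 1 then '1' else '0'] := by
  conv_lhs => rw [binDigits]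
  simp [h]

theorem binDigits_two_mul_add (m b : Nat) (hb : b ≤ 1) (hpos : 0 < 2 * m + b) :
    binDigits (2 * m + b) = binDigits m ++ [if b == 1 then '1' else '0'] := by
  rw [binDigits_of_ne _ (by omega)]
  have h2 : (2 * m + b) / 2 = m := by omega
  have h3 : (2 * m + b) % 2 = b := by omega
  rw [h2, h3]

theorem binDigits_head (n : Nat) (h : 0 < n) : ∃ t, binDigits n = '1' :: t := by
  induction n using Nat.strong_induction_on with
  | _ n ih =>
    by_cases h2 : n / 2 = 0
    · have hn1 : n = 1 := by omega
      subst hn1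
      exact ⟨[], by rw [binDigits_of_ne 1 (by omega)]; simp [binDigits_zero]⟩
    · obtain ⟨t, ht⟩ := ih (n / 2) (Nat.div_lt_self h (by omega)) (by omega)
      exact ⟨t ++ [if n % 2 == 1 then '1' else '0'], by
        rw [binDigits_of_ne n (by omega), ht]; simp⟩

theorem pat_append (xs : List Char) : ∀ (p : Bool) (ys : List Char),
    pat p (xs ++ ys) = pat p xs ++ pat (parAcc p xs) ys := by
  induction xs with
  | nil => intro p ys; simp [pat, parAcc]
  | cons c t ih =>
    intro p ys
    simp only [List.cons_append, pat, parAcc, List.foldl_cons]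
    rw [ih]
    rfl

theorem parAcc_binDigits (m : Nat) :
    parAcc false (binDigits m) = decide (gN m % 2 = 1) := by
  induction m using Nat.strong_induction_on with
  | _ m ih =>
    by_cases h : m = 0
    · subst h; simp [binDigits_zero, parAcc, gN_zero]
    · rw [binDigits_of_ne m h]
      have happ : ∀ xs c, parAcc false (xs ++ [c]) = (parAcc false xs ^^ (c == '1')) := by
        intro xs c; simp [parAcc, List.foldl_append]
      rw [happ, ih (m / 2) (Nat.div_lt_self (Nat.pos_of_ne_zero h) (by omega))]
      have hg : gN m % 2 = (m ^^^ gN (m / 2)) % 2 := by rw [← gN_of_ne m h]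
      have hx : (m ^^^ gN (m / 2)) % 2 = (m % 2 + gN (m / 2) % 2) % 2 := by
        have h0 : (m ^^^ gN (m / 2)).testBit 0 = (m.testBit 0 ^^ (gN (m / 2)).testBit 0) :=
          Nat.testBit_xor m (gN (m / 2)) 0
        simp only [Nat.testBit_zero] at h0
        have hm2 : m % 2 = 0 ∨ m % 2 = 1 := by omega
        have hg2 : gN (m / 2) % 2 = 0 ∨ gN (m / 2) % 2 = 1 := by omega
        have hx2 : (m ^^^ gN (m / 2)) % 2 = 0 ∨ (m ^^^ gN (m / 2)) % 2 = 1 := by omega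
        rcases hm2 with h1 | h1 <;> rcases hg2 with h2 | h2 <;>
          rcases hx2 with h3 | h3 <;> simp [h1, h2, h3] at h0 ⊢
      rw [hg, hx]
      have hm2 : m % 2 = 0 ∨ m % 2 = 1 := by omega
      have hg2 : gN (m / 2) % 2 = 0 ∨ gN (m / 2) % 2 = 1 := by omega
      rcases hm2 with h1 | h1 <;> rcases hg2 with h2 | h2 <;> simp [h1, h2]

-- MAIN: the Gray decode's binary digits are the prefix parities of n's digits.
theorem main_gray (n : Nat) (h : 0 < n) :
    binDigits (gN n) = pat false (binDigits n) := by
  induction n using Nat.strong_induction_on with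
  | _ n ih =>
    have hb : n % 2 ≤ 1 := by omega
    have hn : n = 2 * (n / 2) + n % 2 := by omega
    by_cases h2 : n / 2 = 0
    · have hn1 : n = 1 := by omega
      subst hn1
      have hg1 : gN 1 = 1 := by rw [gN_of_ne 1 (by omega)]; simp [gN_zero]
      have hb1 : binDigits 1 = ['1'] := by
        rw [binDigits_of_ne 1 (by omega)]; simp [binDigits_zero]
      rw [hg1, hb1]; simp [pat]
    · have hm : 0 < n / 2 := by omega
      have hgm : 0 < gN (n / 2) := gN_pos _ hm
      have he : n % 2 ^^^ gN (n / 2) % 2 ≤ 1 := by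
        have h1 : n % 2 = 0 ∨ n % 2 = 1 := by omega
        have h2' : gN (n / 2) % 2 = 0 ∨ gN (n / 2) % 2 = 1 := by omega
        rcases h1 with h1 | h1 <;> rcases h2' with h2' | h2' <;> simp [h1, h2']
      -- LHS
      have hgN : gN n = 2 * gN (n / 2) + (n % 2 ^^^ gN (n / 2) % 2) := by
        conv_lhs => rw [hn]
        exact gN_two_mul_add (n / 2) (n % 2) hb (by omega)
      have hL : binDigits (gN n)
          = binDigits (gN (n / 2)) ++ [if (n % 2 ^^^ gN (n / 2) % 2) == 1 then '1' else '0'] := by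
        rw [hgN]
        exact binDigits_two_mul_add _ _ he (by omega)
      -- RHS
      have hR : binDigits n = binDigits (n / 2) ++ [if n % 2 == 1 then '1' else '0'] :=
        binDigits_of_ne n (by omega)
      rw [hL, hR, pat_append, ih (n / 2) (Nat.div_lt_self h (by omega)) hm,
        parAcc_binDigits]
      congr 1
      have h1 : n % 2 = 0 ∨ n % 2 = 1 := by omega
      have h2' : gN (n / 2) % 2 = 0 ∨ gN (n / 2) % 2 = 1 := by omega
      rcases h1 with h1 | h1 <;> rcases h2' with h2' | h2' <;>
        simp [h1, h2', pat]

-- A's foldl produces exactly pat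
theorem foldl_pat (chars : List Char) : ∀ (c : Int) (acc : List Char),
    (chars.foldl
      (fun (st : Int × List Char) (bit : Char) =>
        let cum_sum : Int := st.1 + (if bit == '1' then 1 else 0)
        (cum_sum, st.2 ++ [if cum_sum % 2 == 1 then '1' else '0']))
      (c, acc)).2 = acc ++ pat (c % 2 == 1) chars := by
  induction chars with
  | nil => intro c acc; simp [pat]
  | cons ch t ih =>
    intro c acc
    simp only [List.foldl_cons]
    rw [ih]
    have hkey : ((c + (if ch == '1' then (1:Int) else 0)) % 2 == 1)
        = ((c % 2 == 1) ^^ (ch == '1')) := by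
      have hc : c % 2 = 0 ∨ c % 2 = 1 := Int.emod_two_eq_zero_or_one c
      by_cases hch : ch == '1' <;> rcases hc with h | h <;>
        simp [hch, h] <;> omega
    simp only [pat, hkey]
    cases hp : (c % 2 == 1) <;> cases hch : (ch == '1') <;>
      simp [hp, hch] at hkey ⊢

-- grayLoop over Nat casts equals n XOR gN mask
theorem grayLoop_cast (mask : Nat) : ∀ n : Nat,
    grayLoop (n : Int) (mask : Int) = ((n ^^^ gN mask : Nat) : Int) := by
  induction mask using Nat.strong_induction_on with
  | _ mask ih =>
    intro n
    by_cases h : mask = 0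
    · subst h
      rw [grayLoop]
      simp [gN_zero]
    · rw [grayLoop]
      have hneg : ¬ ((mask : Int) ≤ 0) := by
        have : 0 < mask := Nat.pos_of_ne_zero h
        omega
      simp only [hneg, dif_neg, not_false_iff]
      have hxor : Int.xor (n : Int) (mask : Int) = ((n ^^^ mask : Nat) : Int) := by
        simp [Int.xor]
      have hshift : Int.shiftRight (mask : Int) 1 = ((mask >>> 1 : Nat) : Int) := by
        simp [Int.shiftRight]
      rw [hxor, hshift, ih (mask >>> 1) (by simp [Nat.shiftRight_one]; omega)]
      congr 1
      rw [Nat.shiftRight_one, gN_of_ne mask h, ← Nat.xor_assoc]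

-- ===== VERDICT (by name: the statement is the Claim_ definition above) =====
theorem binary_parity_pattern_spec : Claim_equal_binary_parity_pattern := by
  intro number _ hpre
  unfold Spec_binary_parity_pattern
  unfold Pre_binary_parity_pattern at hpre
  by_cases h0 : number = 0
  · subst h0
    rw [binary_parity_pattern, binary_parity_pattern_alt]
    have hs : Int.shiftRight (0 : Int) 1 = 0 := by decide
    rw [hs, grayLoop]
    simp only [pyBin]
    decide
  · -- number > 0
    set n : Nat := number.toNat with hn
    have hcast : number = (n : Int) := by omega
    have hnpos : 0 < n := by omega
    -- B side
    have hB : binary_parity_pattern_alt number = String.ofList ('0' :: 'b' :: binDigits (gN n)) := by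
      rw [binary_parity_pattern_alt, hcast]
      have hshift : Int.shiftRight (n : Int) 1 = ((n >>> 1 : Nat) : Int) := by
        simp [Int.shiftRight]
      rw [hshift, grayLoop_cast]
      have hval : (n ^^^ gN (n >>> 1)) = gN n := by
        rw [Nat.shiftRight_one, ← gN_of_ne n (by omega)]
      rw [hval, pyBin]
      have hgn : gN n ≠ 0 := by have := gN_pos n hnpos; omega
      simp [hgn]
    -- A side
    rw [hB, binary_parity_pattern]
    rw [if_neg h0]
    have hbs : (pyBin number).toList.drop 2 = binDigits n := by
      rw [pyBin, if_neg h0, hcast]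
      simp [String.toList_ofList]
    simp only [hbs]
    rw [foldl_pat]
    have hz : ((0 : Int) % 2 == 1) = false := by decide
    rw [hz, List.nil_append, ← main_gray n hnpos]
    obtain ⟨t, ht⟩ := binDigits_head (gN n) (gN_pos n hnpos)
    rw [ht]
    simp
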